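-- pv_equiv track=rewrite | github.com/ethanol-cx/crime-prediction | fwdfiles/resourceAllocation_functions.py | assignRemainingUniformly
-- ===== SOURCE A (Python) =====
-- def assignRemainingUniformly(allocation, available_resources=40):
--     # distribute resources accross clusters uniformly (better on clusters with similar area)
--     # a better approach would use the area of each cluster
--     allocation = [x + available_resources//len(allocation) for x in allocation]
--     available_resources = available_resources % len(allocation)
--
--     # assign allocations in order
--     geo = 0
--     while(available_resources > 0 and geo < len(allocation)):
--         # allocate remaining
--         allocation[geo] += 1
--         available_resources -= 1
--         geo += 1
--
--     return allocation
-- ===== SOURCE B (Python) =====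
-- def assignRemainingUniformly(allocation, available_resources=40):
--     # sequential fair split: each cluster in turn takes the ceiling of the
--     # remaining resources over the remaining number of clusters
--     out = []
--     remaining = available_resources
--     left = len(allocation)
--     for x in allocation:
--         share = -((-remaining) // left)  # ceiling division
--         out.append(x + share)
--         remaining -= share
--         left -= 1
--     return out
-- ===== Notes on version B (the rewrite author's own statement) =====
-- stated objective: alternative
-- what changed: Replaces the two-phase scheme (add the precomputed quotient to everyone, then hand out the remainder one unit at a time in a mutating while-loop) with a single online pass that keeps (remaining resources, clusters left) as state and gives each cluster the ceiling of remaining/left, never computing a global quotient or remainder.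
-- crash fix: On the empty allocation list A raises ZeroDivisionError (len(allocation) is 0 in the division) while B's loop never runs and it returns []. — e.g. on assignRemainingUniformly([], 40): A raises ZeroDivisionError, B returns []
import Mathlib
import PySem

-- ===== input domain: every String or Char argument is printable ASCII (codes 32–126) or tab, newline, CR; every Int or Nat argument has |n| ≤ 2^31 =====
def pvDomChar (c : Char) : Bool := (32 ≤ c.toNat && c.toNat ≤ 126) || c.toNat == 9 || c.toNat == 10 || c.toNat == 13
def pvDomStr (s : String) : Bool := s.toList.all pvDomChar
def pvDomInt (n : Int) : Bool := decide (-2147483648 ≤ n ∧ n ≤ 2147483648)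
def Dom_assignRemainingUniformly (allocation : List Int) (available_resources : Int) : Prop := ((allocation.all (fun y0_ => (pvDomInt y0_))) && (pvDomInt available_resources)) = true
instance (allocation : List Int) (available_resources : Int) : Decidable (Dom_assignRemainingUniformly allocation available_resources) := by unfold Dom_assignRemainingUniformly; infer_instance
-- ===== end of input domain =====

-- B replaces A's two-phase scheme (add the precomputed quotient to all, then a mutating
-- while-loop handing out the remainder) with one online pass keeping (remaining, left)
-- as state and giving each cluster ceil(remaining/left); same return value, no mutation.

-- ===== PORT A =====
-- the while-loop of A: 'while available_resources > 0 and geo < len(allocation): allocation[geo] += 1; ...'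
def pvLoopA (alloc : List Int) (ar : Int) (geo : Nat) : List Int :=
  if h : ar > 0 ∧ geo < alloc.length then
    pvLoopA (alloc.modify geo (· + 1)) (ar - 1) (geo + 1)
  else alloc
termination_by alloc.length - geo
decreasing_by simp only [List.length_modify]; omega

def assignRemainingUniformly (allocation : List Int) (available_resources : Int) : List Int :=
  let alloc := allocation.map (fun x => x + PySem.Int.floordiv available_resources (allocation.length : Int))
  let ar := PySem.Int.mod available_resources (alloc.length : Int)
  pvLoopA alloc ar 0

-- ===== PORT B =====
-- the for-loop of B: keeps (remaining, left), appends x + ceil(remaining/left) each step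
def pvSeqB : List Int → Int → Int → List Int
  | [], _, _ => []
  | x :: xs, remaining, left =>
    let share := -(PySem.Int.floordiv (-remaining) left)   -- -((-remaining) // left)
    (x + share) :: pvSeqB xs (remaining - share) (left - 1)

def assignRemainingUniformly_alt (allocation : List Int) (available_resources : Int) : List Int :=
  pvSeqB allocation available_resources (allocation.length : Int)

-- ===== PRECONDITION & SPEC =====
-- Pre_ excludes only the empty list, on which A raises ZeroDivisionError.
def Pre_assignRemainingUniformly (allocation : List Int) (available_resources : Int) : Prop := allocation ≠ []
instance (allocation : List Int) (available_resources : Int) : Decidable (Pre_assignRemainingUniformly allocation available_resources) := by unfold Pre_assignRemainingUniformly; infer_instance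
def pvWitness_assignRemainingUniformly : List Int × Int := ([3, 0, 5], 7)

-- On the empty allocation list A raises ZeroDivisionError while B's loop never runs and it returns [].
def Raises_assignRemainingUniformly (allocation : List Int) (available_resources : Int) : Prop := allocation = []
instance (allocation : List Int) (available_resources : Int) : Decidable (Raises_assignRemainingUniformly allocation available_resources) := by unfold Raises_assignRemainingUniformly; infer_instance
def pvRaiseWitness_assignRemainingUniformly : List Int × Int := ([], 40)
def pvRaiseWitnessOut_assignRemainingUniformly : List Int := []

def Spec_assignRemainingUniformly (allocation : List Int) (available_resources : Int) (out : List Int) : Prop := out = assignRemainingUniformly_alt allocation available_resources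
instance (allocation : List Int) (available_resources : Int) (out : List Int) : Decidable (Spec_assignRemainingUniformly allocation available_resources out) := by unfold Spec_assignRemainingUniformly; infer_instance

-- ===== CLAIM (what is proved, stated in full; the proofs are below) =====
def Claim_equal_assignRemainingUniformly : Prop := ∀ (allocation : List Int) (available_resources : Int), Dom_assignRemainingUniformly allocation available_resources → Pre_assignRemainingUniformly allocation available_resources → Spec_assignRemainingUniformly allocation available_resources (assignRemainingUniformly allocation available_resources)
def Claim_raises_assignRemainingUniformly : Prop := (∀ (allocation : List Int) (available_resources : Int), Dom_assignRemainingUniformly allocation available_resources → Raises_assignRemainingUniformly allocation available_resources → ¬ Pre_assignRemainingUniformly allocation available_resources) ∧ (Dom_assignRemainingUniformly (pvRaiseWitness_assignRemainingUniformly.1) (pvRaiseWitness_assignRemainingUniformly.2) ∧ Raises_assignRemainingUniformly (pvRaiseWitness_assignRemainingUniformly.1) (pvRaiseWitness_assignRemainingUniformly.2) ∧ assignRemainingUniformly_alt (pvRaiseWitness_assignRemainingUniformly.1) (pvRaiseWitness_assignRemainingUniformly.2) = pvRaiseWitnessOut_assignRemainingUniformly)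

-- ===== LEMMAS AND PROOFS =====

-- shifting the enumerate start by one shifts the cutoff by one
theorem pvEnumShift : ∀ (xs : List Int) (s r q : Int),
    (PySem.List.enumerate xs s).map (fun p => p.2 + q + if p.1 < r then 1 else 0)
      = (PySem.List.enumerate xs (s + 1)).map (fun p => p.2 + q + if p.1 < r + 1 then 1 else 0) := by
  intro xs
  induction xs with
  | nil => intro s r q; simp [PySem.List.enumerate_nil]
  | cons x xs ih =>
    intro s r q
    simp only [PySem.List.enumerate_cons, List.map_cons]
    rw [ih (s + 1) r q]
    congr 1
    by_cases h : s < r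
    · rw [if_pos h, if_pos (by omega)]
    · rw [if_neg h, if_neg (by omega)]

-- when the cutoff is at or below the start, every conditional is 0
theorem pvEnumNoop : ∀ (xs : List Int) (s r q : Int), r ≤ s →
    (PySem.List.enumerate xs s).map (fun p => p.2 + q + if p.1 < r then 1 else 0)
      = xs.map (fun x => x + q) := by
  intro xs
  induction xs with
  | nil => intro s r q _; simp [PySem.List.enumerate_nil]
  | cons x xs ih =>
    intro s r q h
    simp only [PySem.List.enumerate_cons, List.map_cons]
    rw [if_neg (by omega), ih (s + 1) r q (by omega)]
    simp

-- modifying at the index just past a prefix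
theorem pvModifyAt : ∀ (pre : List Int) (x : Int) (xs : List Int),
    (pre ++ x :: xs).modify pre.length (· + 1) = pre ++ (x + 1) :: xs := by
  intro pre
  induction pre with
  | nil => intro x xs; simp [List.modify]
  | cons y ys ih => intro x xs; simp only [List.cons_append, List.length_cons, List.modify_succ_cons, ih x xs]

-- A's while-loop adds 1 to exactly the first 'ar' elements after position pre.length
theorem pvLoopA_spec : ∀ (suf pre : List Int) (ar : Int),
    pvLoopA (pre ++ suf) ar pre.length
      = pre ++ (PySem.List.enumerate suf).map (fun p => p.2 + if p.1 < ar then 1 else 0) := by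
  intro suf
  induction suf with
  | nil =>
    intro pre ar
    rw [pvLoopA, dif_neg (by simp)]
    simp [PySem.List.enumerate_nil]
  | cons x xs ih =>
    intro pre ar
    rw [pvLoopA]
    by_cases har : ar > 0
    · rw [dif_pos ⟨har, by simp⟩, pvModifyAt]
      have h1 : pre ++ (x + 1) :: xs = (pre ++ [x + 1]) ++ xs := by simp
      have h2 : pre.length + 1 = (pre ++ [x + 1]).length := by simp
      rw [h1, h2, ih (pre ++ [x + 1]) (ar - 1)]
      simp only [PySem.List.enumerate, List.map_cons, List.append_assoc,
        List.cons_append, List.nil_append]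
      rw [if_pos (by omega)]
      congr 2
      have := pvEnumShift xs 0 (ar - 1) 0
      simpa using this
    · rw [dif_neg (by tauto)]
      have := pvEnumNoop (x :: xs) 0 ar 0 (by omega)
      simp only [add_zero] at this
      rw [this]
      simp

-- enumerate commutes with a map on the values
theorem pvEnumMap : ∀ (xs : List Int) (q r : Int) (s : Int),
    (PySem.List.enumerate (xs.map (fun x => x + q)) s).map (fun p => p.2 + if p.1 < r then 1 else 0)
      = (PySem.List.enumerate xs s).map (fun p => p.2 + q + if p.1 < r then 1 else 0) := by
  intro xs q r
  induction xs with
  | nil => intro s; simp [PySem.List.enumerate_nil]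
  | cons x xs ih =>
    intro s
    simp only [List.map_cons, PySem.List.enumerate_cons, List.map_cons]
    rw [ih (s + 1)]

-- B's sequential ceiling pass, on input q*n + r with 0 ≤ r ≤ n = xs.length,
-- hands out q+1 to the first r clusters and q to the rest
theorem pvSeqB_spec : ∀ (xs : List Int) (q r : Int), 0 ≤ r → r ≤ (xs.length : Int) →
    pvSeqB xs (q * (xs.length : Int) + r) (xs.length : Int)
      = (PySem.List.enumerate xs).map (fun p => p.2 + q + if p.1 < r then 1 else 0) := by
  intro xs
  induction xs with
  | nil => intro q r _ _; simp [pvSeqB, PySem.List.enumerate_nil]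
  | cons x xs ih =>
    intro q r hr0 hrL
    have hL : (0 : Int) < ((x :: xs).length : Int) := by simp
    simp only [pvSeqB]
    by_cases hr : r = 0
    · subst hr
      have hshare : -(PySem.Int.floordiv (-(q * ((x :: xs).length : Int) + 0)) ((x :: xs).length : Int)) = q := by
        rw [PySem.Int.neg_floordiv_neg_eq_iff_of_pos hL]
        constructor <;> nlinarith
      rw [hshare]
      have hrem : q * ((x :: xs).length : Int) + 0 - q = q * (xs.length : Int) + 0 := by
        simp only [List.length_cons]; push_cast; ring
      have hleft : ((x :: xs).length : Int) - 1 = (xs.length : Int) := by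
        simp only [List.length_cons]; push_cast; ring
      rw [hrem, hleft, ih q 0 le_rfl (by positivity)]
      simp only [PySem.List.enumerate_cons, List.map_cons, if_neg (by omega : ¬ (0:Int) < 0), add_zero]
      congr 1
      have h1 := pvEnumNoop xs 1 0 q (by omega)
      have h0 := pvEnumNoop xs 0 0 q (by omega)
      simp only [zero_add]
      rw [h0, h1]
    · have hshare : -(PySem.Int.floordiv (-(q * ((x :: xs).length : Int) + r)) ((x :: xs).length : Int)) = q + 1 := by
        rw [PySem.Int.neg_floordiv_neg_eq_iff_of_pos hL]
        have hrp : (0 : Int) < r := lt_of_le_of_ne hr0 (Ne.symm hr)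
        constructor
        · have e : (q + 1 - 1) * ((x :: xs).length : Int) = q * ((x :: xs).length : Int) := by ring
          rw [e]; linarith
        · have e : (q + 1) * ((x :: xs).length : Int) = q * ((x :: xs).length : Int) + ((x :: xs).length : Int) := by ring
          rw [e]; linarith
      rw [hshare]
      have hrem : q * ((x :: xs).length : Int) + r - (q + 1) = q * (xs.length : Int) + (r - 1) := by
        simp only [List.length_cons]; push_cast; ring
      have hleft : ((x :: xs).length : Int) - 1 = (xs.length : Int) := by
        simp only [List.length_cons]; push_cast; ring
      have hrL' : r - 1 ≤ (xs.length : Int) := by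
        simp only [List.length_cons] at hrL; push_cast at hrL ⊢; omega
      rw [hrem, hleft, ih q (r - 1) (by omega) hrL']
      simp only [PySem.List.enumerate_cons, List.map_cons, if_pos (by omega : (0:Int) < r)]
      congr 1
      · ring
      · simp only [zero_add]
        have := pvEnumShift xs 0 (r - 1) q
        simp only [zero_add, sub_add_cancel] at this
        exact this

-- ===== VERDICT (by name: the statement is the Claim_ definition above) =====
theorem assignRemainingUniformly_spec : Claim_equal_assignRemainingUniformly := by
  intro allocation ar _ hpre
  show assignRemainingUniformly allocation ar = assignRemainingUniformly_alt allocation ar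
  have hn : (0 : Int) < (allocation.length : Int) := by
    cases allocation with
    | nil => exact absurd rfl hpre
    | cons a as => simp
  set n : Int := (allocation.length : Int) with hn_def
  set q : Int := PySem.Int.floordiv ar n with hq
  set r : Int := PySem.Int.mod ar n with hr
  have hdecomp : ar = q * n + r := by
    rw [hq, hr]
    exact (PySem.Int.floordiv_mul_add_mod ar n).symm
  have hrE : r = ar % n := by rw [hr, PySem.Int.mod_eq_emod_of_pos hn]
  have hr0 : 0 ≤ r := by rw [hrE]; exact Int.emod_nonneg ar (by omega)
  have hrn : r < n := by rw [hrE]; exact Int.emod_lt_of_pos ar hn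
  unfold assignRemainingUniformly assignRemainingUniformly_alt
  simp only [List.length_map, ← hn_def, ← hq, ← hr]
  have hA := pvLoopA_spec (allocation.map (fun x => x + q)) [] r
  simp only [List.nil_append, List.length_nil] at hA
  rw [hA, pvEnumMap]
  rw [hdecomp, pvSeqB_spec allocation q r hr0 (le_of_lt hrn)]

@[simp]
theorem assignRemainingUniformly_raises : Claim_raises_assignRemainingUniformly := by
  unfold Claim_raises_assignRemainingUniformly
  exact ⟨fun allocation ar _ h => by
    unfold Raises_assignRemainingUniformly at h
    subst h
    simp [Pre_assignRemainingUniformly], by decide⟩
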